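-- pv_equiv track=rewrite | github.com/sanoojps/PythonForDatatStructuresUdemy | WordSplitWithRecursion.py | make_substring_and_match
-- ===== SOURCE A (Python) =====
-- def make_substring_and_match(
--         phrase:str,
--         word_to_match: str):
--
--     length = len(word_to_match)
--
--     matches = []
--
--     substrings = []
--
--     tmp_word = ""
--
--     # loop through all chars in phrase
--     for char in phrase:
--
--         # add to tmp_word
--         # to begin construction of a substring
--         # substring would be of the same length as the
--         # "word_to_match"
--         tmp_word += char
--
--         if len(tmp_word) == length:
--
--             # add to substrings
--             substrings.append(tmp_word)
--
--             # check for match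
--             if tmp_word == word_to_match:
--                 matches.append(tmp_word)
--             else:
--                 pass
--
--             # reset tmp_word
--             tmp_word = ""
--
--         else:
--             pass
--
--
--     return matches
-- ===== SOURCE B (Python) =====
-- def make_substring_and_match(
--         phrase: str,
--         word_to_match: str):
--     # Step over chunk start positions and slice, instead of building each
--     # chunk character-by-character in an accumulator.
--     length = len(word_to_match)
--     if length == 0:
--         return []
--     return [phrase[i:i + length]
--             for i in range(0, len(phrase) - length + 1, length)
--             if phrase[i:i + length] == word_to_match]
-- ===== Notes on version B (the rewrite author's own statement) =====
-- stated objective: simpler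
-- what changed: Replaces the character-by-character accumulator loop (building tmp_word and resetting it) with a single comprehension over chunk start positions stepping by len(word), slicing each chunk directly.
import Mathlib
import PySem

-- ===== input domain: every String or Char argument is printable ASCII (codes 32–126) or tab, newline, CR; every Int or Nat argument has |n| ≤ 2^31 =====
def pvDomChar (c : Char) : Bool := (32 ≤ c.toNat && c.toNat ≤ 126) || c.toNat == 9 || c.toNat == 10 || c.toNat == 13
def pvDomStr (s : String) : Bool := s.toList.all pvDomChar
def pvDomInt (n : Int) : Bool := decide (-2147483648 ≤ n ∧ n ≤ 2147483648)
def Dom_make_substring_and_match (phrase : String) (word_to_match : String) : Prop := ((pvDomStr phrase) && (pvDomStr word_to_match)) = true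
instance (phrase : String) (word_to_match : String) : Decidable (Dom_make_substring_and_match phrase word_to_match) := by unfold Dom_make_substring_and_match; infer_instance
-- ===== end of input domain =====

-- B replaces A's char-by-char accumulator loop by a comprehension over chunk start
-- positions stepping by len(word) and slicing (objective: simpler). Same return value.

-- ===== PORT A =====
-- A's loop body: tmp_word += char; when len(tmp_word) == length, record the chunk on a
-- match and reset tmp_word; state = (matches, tmp_word).
def aStep (length : Nat) (w : List Char) (st : List String × List Char) (c : Char) :
    List String × List Char :=
  let tmp := st.2 ++ [c]
  if tmp.length = length then
    ((if tmp = w then st.1 ++ [String.ofList tmp] else st.1), ([] : List Char))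
  else (st.1, tmp)

-- for char in phrase: aStep; return matches.
def make_substring_and_match (phrase : String) (word_to_match : String) : List String :=
  (phrase.toList.foldl (aStep word_to_match.toList.length word_to_match.toList)
    (([] : List String), ([] : List Char))).1

-- ===== PORT B =====
-- guard length == 0, then [phrase[i:i+length] for i in range(0, len(phrase)-length+1, length) if …]
def make_substring_and_match_alt (phrase : String) (word_to_match : String) : List String :=
  let w := word_to_match.toList
  let cs := phrase.toList
  let length : Int := w.length
  if length = 0 then []
  else (PySem.List.pyRange 0 ((cs.length : Int) - length + 1) length).filterMap
    (fun i =>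
      let chunk := PySem.List.slice cs (some i) (some (i + length))
      if chunk = w then some (String.ofList chunk) else none)

-- ===== PRECONDITION & SPEC =====
def Spec_make_substring_and_match (phrase : String) (word_to_match : String) (out : List String) : Prop := out = make_substring_and_match_alt phrase word_to_match
instance (phrase : String) (word_to_match : String) (out : List String) : Decidable (Spec_make_substring_and_match phrase word_to_match out) := by unfold Spec_make_substring_and_match; infer_instance

-- ===== CLAIM (what is proved, stated in full; the proofs are below) =====
def Claim_equal_make_substring_and_match : Prop := ∀ (phrase : String) (word_to_match : String), Dom_make_substring_and_match phrase word_to_match → Spec_make_substring_and_match phrase word_to_match (make_substring_and_match phrase word_to_match)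

-- ===== LEMMAS AND PROOFS =====

-- Reference recursion both ports are reduced to: peel one chunk of length L at a time.
def chunkRef (L : Nat) (w : List Char) (cs : List Char) : List String :=
  if _h : L = 0 ∨ cs.length < L then []
  else (if cs.take L = w then [String.ofList (cs.take L)] else []) ++ chunkRef L w (cs.drop L)
termination_by cs.length
decreasing_by
  simp only [List.length_drop]
  omega

theorem aStep_accum (L : Nat) (w : List Char) (cs : List Char) :
    ∀ (m : List String) (t : List Char),
      (cs.foldl (aStep L w) (m, t)).1 = m ++ (cs.foldl (aStep L w) ([], t)).1 := by
  induction cs with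
  | nil => intro m t; simp
  | cons c cs ih =>
    intro m t
    simp only [List.foldl_cons, aStep, List.nil_append]
    split_ifs with h1 h2
    · rw [ih (m ++ [String.ofList (t ++ [c])]) [], ih [String.ofList (t ++ [c])] []]
      simp
    · exact ih m []
    · exact ih m (t ++ [c])

theorem aStep_short (L : Nat) (w : List Char) (cs : List Char) :
    ∀ (m : List String) (t : List Char), t.length + cs.length < L →
      cs.foldl (aStep L w) (m, t) = (m, t ++ cs) := by
  induction cs with
  | nil => intro m t _; simp
  | cons c cs ih =>
    intro m t h
    simp only [List.foldl_cons, aStep]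
    rw [if_neg (by simp at h ⊢; omega)]
    rw [ih m (t ++ [c]) (by simp at h ⊢; omega)]
    simp

theorem aStep_zero (w : List Char) (cs : List Char) :
    ∀ (m : List String) (t : List Char), cs.foldl (aStep 0 w) (m, t) = (m, t ++ cs) := by
  induction cs with
  | nil => intro m t; simp
  | cons c cs ih =>
    intro m t
    simp only [List.foldl_cons, aStep]
    rw [if_neg (by simp)]
    rw [ih m (t ++ [c])]
    simp

theorem aStep_fill (L : Nat) (w : List Char) (pre : List Char) :
    ∀ (cs : List Char) (m : List String) (t : List Char), pre ≠ [] →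
      t.length + pre.length = L →
      (pre ++ cs).foldl (aStep L w) (m, t) =
        cs.foldl (aStep L w)
          ((if t ++ pre = w then m ++ [String.ofList (t ++ pre)] else m), ([] : List Char)) := by
  induction pre with
  | nil => intro cs m t hne _; exact absurd rfl hne
  | cons p pre ih =>
    intro cs m t _ hlen
    simp only [List.cons_append, List.foldl_cons, aStep]
    by_cases hpre : pre = []
    · subst hpre
      rw [if_pos (by simp at hlen ⊢; omega)]
      simp
    · have hplen : 0 < pre.length := List.length_pos_iff.mpr hpre
      rw [if_neg (by simp at hlen ⊢; omega)]
      rw [ih cs m (t ++ [p]) hpre (by simp at hlen ⊢; omega)]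
      simp

theorem a_eq_chunkRef (L : Nat) (w : List Char) (hL : L ≠ 0) :
    ∀ (n : Nat) (cs : List Char), cs.length ≤ n →
      (cs.foldl (aStep L w) ([], [])).1 = chunkRef L w cs := by
  intro n
  induction n with
  | zero =>
    intro cs hn
    have : cs = [] := List.eq_nil_of_length_eq_zero (by omega)
    subst this
    rw [chunkRef, dif_pos (by right; simpa using Nat.pos_of_ne_zero hL)]
    simp
  | succ n ih =>
    intro cs hn
    by_cases hshort : cs.length < L
    · rw [chunkRef, dif_pos (Or.inr hshort)]
      rw [aStep_short L w cs [] [] (by simpa using hshort)]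
    · have hLle : L ≤ cs.length := le_of_not_gt hshort
      have hsplit : cs = cs.take L ++ cs.drop L := (List.take_append_drop L cs).symm
      rw [chunkRef, dif_neg (by push_neg; exact ⟨hL, le_of_not_gt hshort⟩)]
      conv_lhs => rw [hsplit]
      rw [aStep_fill L w (cs.take L) (cs.drop L) [] []
        (by intro h; have := congrArg List.length h
            simp only [List.length_take, List.length_nil] at this; omega)
        (by simp; omega)]
      simp only [List.nil_append]
      rw [aStep_accum]
      rw [ih (cs.drop L) (by simp; omega)]

-- B's comprehension body, abstracted.
def bBody (L : Nat) (w : List Char) (cs : List Char) (i : Int) : Option String :=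
  let chunk := PySem.List.slice cs (some i) (some (i + (L : Int)))
  if chunk = w then some (String.ofList chunk) else none

theorem bBody_shift (L : Nat) (w : List Char) (cs : List Char) (k : Nat) :
    bBody L w cs ((L : Int) * ((k : Int) + 1)) = bBody L w (cs.drop L) ((L : Int) * (k : Int)) := by
  unfold bBody
  have h1 : (L : Int) * ((k : Int) + 1) = ((L * (k + 1) : Nat) : Int) := by push_cast; ring
  have h3 : (L : Int) * (k : Int) = ((L * k : Nat) : Int) := by push_cast; ring
  simp only [h1, h3, PySem.List.slice_natCast_add]
  rw [List.drop_drop, show L + L * k = L * (k + 1) from by ring]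

theorem b_eq_chunkRef (L : Nat) (w : List Char) (hL : L ≠ 0) :
    ∀ (n : Nat) (cs : List Char), cs.length ≤ n →
      (PySem.List.pyRange 0 ((cs.length : Int) - (L : Int) + 1) (L : Int)).filterMap
        (bBody L w cs) = chunkRef L w cs := by
  have hLpos : (0 : Int) < (L : Int) := by exact_mod_cast Nat.pos_of_ne_zero hL
  intro n
  induction n with
  | zero =>
    intro cs hn
    have hcs : cs = [] := List.eq_nil_of_length_eq_zero (by omega)
    subst hcs
    rw [chunkRef, dif_pos (Or.inr (by simpa using Nat.pos_of_ne_zero hL))]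
    have hp := Nat.pos_of_ne_zero hL
    rw [PySem.List.pyRange_of_pos 0 _ hLpos, if_neg (by simp; omega)]
    simp
  | succ n ih =>
    intro cs hn
    rw [PySem.List.pyRange_of_pos 0 _ hLpos]
    by_cases hshort : cs.length < L
    · rw [chunkRef, dif_pos (Or.inr hshort)]
      rw [if_neg (by push_neg; omega)]
      simp
    · have hLle : L ≤ cs.length := le_of_not_gt hshort
      rw [chunkRef, dif_neg (by push_neg; exact ⟨hL, hLle⟩)]
      -- count of chunks: ((n_cs - L + 1) + L - 1) / L = n_cs / L, and n_cs/L = (n_cs - L)/L + 1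
      have hq : ((cs.length : Int) - (L : Int)) / (L : Int) = (cs.length : Int) / (L : Int) - 1 := by
        have h := Int.add_mul_ediv_right (cs.length : Int) (-1) (show (L : Int) ≠ 0 by omega)
        have e3 : (cs.length : Int) + -1 * (L : Int) = (cs.length : Int) - (L : Int) := by ring
        rw [e3] at h
        omega
      have hge1 : 1 ≤ (cs.length : Int) / (L : Int) :=
        (Int.le_ediv_iff_mul_le hLpos).mpr (by omega)
      have hcount : (((cs.length : Int) - (L : Int) + 1 - 0 + (L : Int) - 1) / (L : Int)).toNat
          = (if 0 < (((cs.drop L).length : Int)) - (L : Int) + 1 then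
              ((((cs.drop L).length : Int) - (L : Int) + 1 - 0 + (L : Int) - 1) / (L : Int)).toNat
            else 0) + 1 := by
        simp only [List.length_drop]
        have e1 : (cs.length : Int) - (L : Int) + 1 - 0 + (L : Int) - 1 = (cs.length : Int) := by ring
        have e2 : ((cs.length - L : Nat) : Int) - (L : Int) + 1 - 0 + (L : Int) - 1
            = (cs.length : Int) - (L : Int) := by push_cast [hLle]; ring
        rw [e1, e2]
        split_ifs with hc
        · omega
        · -- here cs.length < 2 * L, so the whole range has exactly one chunk
          have hlt2 : (cs.length : Int) < 2 * (L : Int) := by push_cast [hLle] at hc; omega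
          have hlt : (cs.length : Int) / (L : Int) < 2 :=
            Int.ediv_lt_of_lt_mul hLpos (by omega)
          omega
      rw [if_pos (by omega)]
      rw [hcount, List.range_succ_eq_map]
      rw [List.map_cons, List.filterMap_cons, List.map_map]
      have hdrop : (cs.drop L).length ≤ n := by simp; omega
      have hrec := ih (cs.drop L) hdrop
      rw [PySem.List.pyRange_of_pos 0 _ hLpos] at hrec
      have htail : List.filterMap (bBody L w cs)
            (List.map ((fun (k : Nat) => 0 + (L : Int) * (k : Int)) ∘ Nat.succ)
              (List.range (if 0 < (((cs.drop L).length : Int)) - (L : Int) + 1 then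
                ((((cs.drop L).length : Int) - (L : Int) + 1 - 0 + (L : Int) - 1) / (L : Int)).toNat
              else 0)))
          = chunkRef L w (cs.drop L) := by
        rw [← hrec, List.filterMap_map, List.filterMap_map]
        apply List.filterMap_congr
        intro k _
        simp only [Function.comp_apply, zero_add]
        have : ((Nat.succ k : Nat) : Int) = (k : Int) + 1 := by push_cast; ring
        rw [this]
        exact bBody_shift L w cs k
      -- head element: i = 0
      have hhead : bBody L w cs (0 + (L : Int) * ((0 : Nat) : Int)) =
          if cs.take L = w then some (String.ofList (cs.take L)) else none := by
        unfold bBody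
        have : (0 : Int) + (L : Int) * ((0 : Nat) : Int) = ((0 : Nat) : Int) := by push_cast; ring
        rw [this]
        have h2 : ((0 : Nat) : Int) + (L : Int) = ((0 : Nat) : Int) + ((L : Nat) : Int) := by push_cast; ring
        rw [h2, PySem.List.slice_natCast_add]
        simp
      rw [htail, hhead]
      split_ifs with hmatch <;> simp

-- ===== VERDICT (by name: the statement is the Claim_ definition above) =====
theorem make_substring_and_match_spec : Claim_equal_make_substring_and_match := by
  intro phrase word _
  unfold Spec_make_substring_and_match make_substring_and_match make_substring_and_match_alt
  simp only
  by_cases hL : word.toList.length = 0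
  · rw [if_pos (by exact_mod_cast hL), hL, aStep_zero]
  · rw [if_neg (by exact_mod_cast hL)]
    rw [a_eq_chunkRef word.toList.length word.toList hL phrase.toList.length phrase.toList le_rfl,
        ← b_eq_chunkRef word.toList.length word.toList hL phrase.toList.length phrase.toList le_rfl]
    rfl
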